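-- pv_equiv track=rewrite | github.com/zadacka/advent_of_code_2021 | day08/day08.py | count_uniques
-- ===== SOURCE A (Python) =====
-- def count_uniques(data):
--     segment_to_digit_map = {2: '1', 3: '7', 4: '4', 7: '8'}  # map of segments illuminated to number shown
--     unique_count = 0
--     for before, after in data:
--         for group in after:
--             if len(group) in segment_to_digit_map:
--                 unique_count += 1
--     return unique_count
-- ===== SOURCE B (Python) =====
-- def count_uniques(data):
--     # Sort all segment-group lengths once, then count each unique-digit length
--     # (2, 3, 4, 7) by binary search on the sorted array: the number of entries
--     # equal to k is (first index > k) - (first index >= k).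
--     lengths = sorted(len(group) for before, after in data for group in after)
--
--     def first_not(pred):
--         # first index at which pred fails (pred holds on a prefix of lengths)
--         lo, hi = 0, len(lengths)
--         while lo < hi:
--             mid = (lo + hi) // 2
--             if pred(lengths[mid]):
--                 lo = mid + 1
--             else:
--                 hi = mid
--         return lo
--
--     total = 0
--     for k in (2, 3, 4, 7):
--         total += first_not(lambda x: x <= k) - first_not(lambda x: x < k)
--     return total
-- ===== Notes on version B (the rewrite author's own statement) =====
-- stated objective: alternative
-- what changed: B sorts the flattened list of group lengths once and then counts occurrences of each unique-digit length 2,3,4,7 by two binary searches per key (first index > k minus first index >= k), instead of A's single nested linear pass testing each length against a dict.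
import Mathlib
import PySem

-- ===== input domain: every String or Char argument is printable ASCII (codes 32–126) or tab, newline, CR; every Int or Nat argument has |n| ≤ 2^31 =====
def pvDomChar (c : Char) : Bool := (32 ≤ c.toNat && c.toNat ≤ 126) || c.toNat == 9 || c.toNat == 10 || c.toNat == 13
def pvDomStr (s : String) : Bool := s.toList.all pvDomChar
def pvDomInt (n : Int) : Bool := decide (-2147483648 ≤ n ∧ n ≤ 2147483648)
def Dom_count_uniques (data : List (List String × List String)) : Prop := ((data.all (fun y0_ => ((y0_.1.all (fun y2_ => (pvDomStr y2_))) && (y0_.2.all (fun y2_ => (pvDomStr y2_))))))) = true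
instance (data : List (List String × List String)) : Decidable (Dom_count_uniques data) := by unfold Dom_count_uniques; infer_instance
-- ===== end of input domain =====

-- B sorts all group lengths once and counts each of the four unique-digit lengths by binary search
-- (alternative algorithm: sort + binary search instead of a linear predicate count).

-- ===== PORT A =====
def count_uniques (data : List (List String × List String)) : Int :=
  let segment_to_digit_map : PySem.Dict Int String :=
    PySem.Dict.ofList [(2, "1"), (3, "7"), (4, "4"), (7, "8")]
  data.foldl (fun unique_count p =>
    p.2.foldl (fun unique_count group =>
      if segment_to_digit_map.contains (PySem.Str.len group) then unique_count + 1
      else unique_count) unique_count) 0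

-- ===== PORT B =====
-- B's hand-written binary-search loop `first_not` (while lo < hi): lo, hi, mid are
-- always in-bounds indices (0 ≤ mid < len), so lengths[mid] is ported as getD mid 0.
def firstNot (xs : List Int) (pred : Int → Bool) (lo hi : Nat) : Nat :=
  if _h : lo < hi then
    let mid := (lo + hi) / 2
    if pred (xs.getD mid 0) then firstNot xs pred (mid + 1) hi
    else firstNot xs pred lo mid
  else lo
termination_by hi - lo
decreasing_by all_goals omega

def count_uniques_alt (data : List (List String × List String)) : Int :=
  let lengths : List Int :=
    PySem.List.sorted ((data.flatMap (·.2)).map PySem.Str.len) (fun x => x) false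
  ([2, 3, 4, 7] : List Int).foldl (fun total k =>
    total + ((firstNot lengths (fun x => x ≤ k) 0 lengths.length : Int)
           - (firstNot lengths (fun x => x < k) 0 lengths.length : Int))) 0

-- ===== PRECONDITION & SPEC =====
def Spec_count_uniques (data : List (List String × List String)) (out : Int) : Prop := out = count_uniques_alt data
instance (data : List (List String × List String)) (out : Int) : Decidable (Spec_count_uniques data out) := by unfold Spec_count_uniques; infer_instance

-- ===== CLAIM (what is proved, stated in full; the proofs are below) =====
def Claim_equal_count_uniques : Prop := ∀ (data : List (List String × List String)), Dom_count_uniques data → Spec_count_uniques data (count_uniques data)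

-- ===== LEMMAS AND PROOFS =====

-- the nested loop over pairs then groups is the same fold over the flattened group list
theorem foldl_pairs_eq_flatMap {β : Type} (data : List (List String × List String))
    (f : β → String → β) (b : β) :
    data.foldl (fun acc p => p.2.foldl f acc) b = (data.flatMap (·.2)).foldl f b := by
  induction data generalizing b with
  | nil => rfl
  | cons hd tl ih => simp [List.flatMap_cons, List.foldl_append, ih]

-- membership in A's literal dict is a four-way comparison of the key
theorem contains_literal (n : Int) :
    (PySem.Dict.ofList [((2:Int), "1"), (3, "7"), (4, "4"), (7, "8")]).contains n
    = (n == 2 || n == 3 || n == 4 || n == 7) := by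
  have h : (PySem.Dict.ofList [((2:Int), "1"), (3, "7"), (4, "4"), (7, "8")]).items
      = [(2, "1"), (3, "7"), (4, "4"), (7, "8")] := by decide
  simp [PySem.Dict.contains, h, Bool.or_assoc, BEq.comm]

-- A's accumulator over a group list, characterised via the element counts of the lengths
theorem a_fold_char (gs : List String) (b : Int) :
    gs.foldl (fun unique_count group =>
      if (PySem.Dict.ofList [((2:Int), "1"), (3, "7"), (4, "4"), (7, "8")]).contains
          (PySem.Str.len group) then unique_count + 1 else unique_count) b
    = b + ((gs.map PySem.Str.len).count 2 + (gs.map PySem.Str.len).count 3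
         + (gs.map PySem.Str.len).count 4 + (gs.map PySem.Str.len).count 7 : Nat) := by
  induction gs generalizing b with
  | nil => simp
  | cons g gs ih =>
    simp only [List.foldl_cons, ih, List.map_cons, List.count_cons]
    rw [contains_literal]
    simp only [beq_iff_eq, PySem.Str.len_eq]
    by_cases h2 : ((g.length : Int)) = 2 <;> by_cases h3 : ((g.length : Int)) = 3 <;>
      by_cases h4 : ((g.length : Int)) = 4 <;> by_cases h7 : ((g.length : Int)) = 7 <;>
      simp [h2, h3, h4, h7] <;> omega

-- in a sorted list, a downward-closed predicate holds exactly on the prefix of length countP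
theorem sorted_prefix_iff (xs : List Int) (p : Int → Bool)
    (hmono : ∀ a b : Int, a ≤ b → p b = true → p a = true)
    (hs : xs.Pairwise (· ≤ ·)) :
    ∀ i (h : i < xs.length), (p xs[i] = true ↔ i < xs.countP p) := by
  induction xs with
  | nil => intro i h; simp at h
  | cons x t ih =>
    rw [List.pairwise_cons] at hs
    intro i h
    by_cases hpx : p x = true
    · cases i with
      | zero =>
        have hc : (x :: t).countP p = t.countP p + 1 := by simp [hpx]
        simp [hpx, hc]
      | succ j =>
        have hc : (x :: t).countP p = t.countP p + 1 := by simp [hpx]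
        simp only [List.getElem_cons_succ, hc]
        rw [ih hs.2 j (by simpa using h)]
        omega
    · have ht0 : t.countP p = 0 := by
        rw [List.countP_eq_zero]
        intro y hy hpy
        exact hpx (hmono x y (hs.1 y hy) hpy)
      have h0 : (x :: t).countP p = 0 := by
        simp [hpx, ht0]
      rw [h0]
      cases i with
      | zero => simp [hpx]
      | succ j =>
        have hj : j < t.length := by simpa using h
        simp only [List.getElem_cons_succ]
        constructor
        · intro hpy
          have hpos := List.countP_pos_iff.mpr ⟨t[j], List.getElem_mem hj, hpy⟩
          omega
        · omega

-- the binary search returns countP p when p holds exactly on a prefix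
theorem firstNot_eq (xs : List Int) (p : Int → Bool)
    (hpref : ∀ i (h : i < xs.length), (p xs[i] = true ↔ i < xs.countP p)) :
    ∀ n lo hi, hi - lo ≤ n → lo ≤ xs.countP p → xs.countP p ≤ hi → hi ≤ xs.length →
      firstNot xs p lo hi = xs.countP p := by
  intro n
  induction n with
  | zero =>
    intro lo hi hn h1 h2 h3
    rw [firstNot]
    simp only [show ¬ lo < hi by omega, dite_false]
    omega
  | succ m ih =>
    intro lo hi hn h1 h2 h3
    rw [firstNot]
    by_cases hlt : lo < hi
    · simp only [hlt, dite_true]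
      have hmid : (lo + hi) / 2 < xs.length := by omega
      have hget : xs.getD ((lo + hi) / 2) 0 = xs[(lo + hi) / 2] := List.getD_eq_getElem xs 0 hmid
      by_cases hp : p (xs.getD ((lo + hi) / 2) 0) = true
      · have : (lo + hi) / 2 < xs.countP p := by
          rw [← hpref _ hmid, ← hget]; exact hp
        simp only [hp, if_true]
        exact ih _ _ (by omega) (by omega) h2 h3
      · have : ¬ ((lo + hi) / 2 < xs.countP p) := by
          rw [← hpref _ hmid, ← hget]; exact hp
        simp only [hp]
        exact ih _ _ (by omega) h1 (by omega) (by omega)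
    · simp only [hlt, dite_false]; omega

-- splitting a ≤-count at k into a <-count and an equality count
theorem countP_le_split (xs : List Int) (k : Int) :
    xs.countP (fun x => x ≤ k) = xs.countP (fun x => x < k) + xs.count k := by
  induction xs with
  | nil => simp
  | cons x t ih =>
    simp only [List.countP_cons, List.count_cons, ih]
    split_ifs <;> simp_all <;> omega

-- B's per-key difference of binary searches is the count of k among the lengths
theorem bs_diff_eq_count (ls : List Int) (k : Int) :
    (firstNot (PySem.List.sorted ls (fun x => x) false) (fun x => x ≤ k) 0
        (PySem.List.sorted ls (fun x => x) false).length : Int)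
    - (firstNot (PySem.List.sorted ls (fun x => x) false) (fun x => x < k) 0
        (PySem.List.sorted ls (fun x => x) false).length : Int)
    = (ls.count k : Int) := by
  set s := PySem.List.sorted ls (fun x => x) false with hsdef
  have hs : s.Pairwise (· ≤ ·) := by
    simpa using PySem.List.sorted_pairwise (xs := ls) (key := fun x => x)
  have hperm : s.Perm ls := by rw [hsdef]; exact PySem.List.sorted_perm ls _ false
  have hle := firstNot_eq s (fun x => x ≤ k)
    (sorted_prefix_iff s (fun x => decide (x ≤ k)) (by intro a b hab hb; exact decide_eq_true (le_trans hab (of_decide_eq_true hb))) hs)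
    s.length 0 s.length (by omega) (by omega) (List.countP_le_length) (le_refl _)
  have hlt := firstNot_eq s (fun x => x < k)
    (sorted_prefix_iff s (fun x => decide (x < k)) (by intro a b hab hb; exact decide_eq_true (lt_of_le_of_lt hab (of_decide_eq_true hb))) hs)
    s.length 0 s.length (by omega) (by omega) (List.countP_le_length) (le_refl _)
  rw [hle, hlt, hperm.countP_eq, hperm.countP_eq, countP_le_split]
  push_cast
  ring

-- ===== VERDICT (by name: the statement is the Claim_ definition above) =====
theorem count_uniques_spec : Claim_equal_count_uniques := by
  intro data _
  unfold Spec_count_uniques count_uniques count_uniques_alt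
  simp only [foldl_pairs_eq_flatMap]
  rw [a_fold_char]
  simp only [List.foldl_cons, List.foldl_nil, bs_diff_eq_count]
  push_cast
  ring
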